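-- pv_equiv track=rewrite | github.com/Temyaroslav/MDS2020 | ADS/edist.py | edistance_substring
-- ===== SOURCE A (Python) =====
-- def edistance_substring(A, B):
--     n = len(A)
--     m = len(B)
--     D = [[0 for _ in range(m + 1)] for _ in range(n + 1)]
--     for i in range(n + 1):
--         for j in range(m + 1):
--             if i == 0:
--                 D[i][j] = j
--             elif j == 0:
--                 D[i][j] = 0
--             elif A[i - 1] == B[j - 1]:
--                 D[i][j] = D[i - 1][j - 1]
--             else:
--                 D[i][j] = 1 + min(
--                     D[i - 1][j],
--                     D[i][j - 1],
--                     D[i - 1][j - 1]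
--                 )  # delete A[i - 1] or B[j - 1] or substitute A[i - 1] for B[j - 1]
--     return D[n][m]
-- ===== SOURCE B (Python) =====
-- def edistance_substring(A, B):
--     # Top-down memoized recursion: rec(i, j) = edit distance of B[:j] against
--     # the best substring of A[:i] ending at i, computed on demand.
--     memo = {}
--
--     def rec(i, j):
--         if i == 0:
--             return j
--         if j == 0:
--             return 0
--         key = (i, j)
--         if key in memo:
--             return memo[key]
--         if A[i - 1] == B[j - 1]:
--             v = rec(i - 1, j - 1)
--         else:
--             v = 1 + min(rec(i - 1, j), rec(i, j - 1), rec(i - 1, j - 1))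
--         memo[key] = v
--         return v
--
--     return rec(len(A), len(B))
-- ===== Notes on version B (the rewrite author's own statement) =====
-- stated objective: alternative
-- what changed: Replaces A's bottom-up fill of the full (n+1)x(m+1) table with demand-driven top-down recursion over (i, j) memoized in a dict, so only the cells the recursion actually needs are ever computed.
import Mathlib
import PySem

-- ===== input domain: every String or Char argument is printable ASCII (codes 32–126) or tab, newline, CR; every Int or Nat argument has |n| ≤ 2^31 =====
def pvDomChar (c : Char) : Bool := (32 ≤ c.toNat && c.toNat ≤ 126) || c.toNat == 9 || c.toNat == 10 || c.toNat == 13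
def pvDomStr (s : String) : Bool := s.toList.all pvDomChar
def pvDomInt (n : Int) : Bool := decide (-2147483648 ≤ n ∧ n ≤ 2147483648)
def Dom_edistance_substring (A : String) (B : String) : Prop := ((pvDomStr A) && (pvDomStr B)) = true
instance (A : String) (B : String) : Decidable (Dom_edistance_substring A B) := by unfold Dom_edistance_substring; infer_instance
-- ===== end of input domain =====

-- B replaces A's bottom-up fill of the whole (n+1)x(m+1) table with demand-driven
-- top-down recursion over (i, j) memoized in a dict (objective: alternative decomposition).

-- ===== PORT A =====
-- D[i][j] read / write on the list-of-lists table (always used in range)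
def pvGD (D : List (List Int)) (i j : Nat) : Int := (D.getD i []).getD j 0
def pvSD (D : List (List Int)) (i j : Nat) (v : Int) : List (List Int) :=
  D.set i ((D.getD i []).set j v)

def edistance_substring (A : String) (B : String) : Int :=
  let a := A.toList
  let b := B.toList
  let n := a.length
  let m := b.length
  let D0 : List (List Int) := List.replicate (n + 1) (List.replicate (m + 1) (0 : Int))
  let D := (List.range (n + 1)).foldl (fun D i =>
      (List.range (m + 1)).foldl (fun D j =>
        pvSD D i j
          (if i = 0 then (j : Int)
           else if j = 0 then 0
           else if a.getD (i - 1) ' ' = b.getD (j - 1) ' ' then pvGD D (i - 1) (j - 1)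
           else 1 + min (pvGD D (i - 1) j) (min (pvGD D i (j - 1)) (pvGD D (i - 1) (j - 1))))) D) D0
  pvGD D n m

-- ===== PORT B =====
-- rec(i, j) of Source B with the memo dict threaded through the calls in Python's
-- evaluation order; keys are the Python int pair (i, j).
def pvRec (a b : List Char) (i j : Nat) (memo : PySem.Dict (Int × Int) Int) :
    Int × PySem.Dict (Int × Int) Int :=
  match i, j with
  | 0, j => ((j : Int), memo)
  | _ + 1, 0 => (0, memo)
  | i + 1, j + 1 =>
    match memo.get? (((i + 1 : Nat) : Int), ((j + 1 : Nat) : Int)) with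
    | some v => (v, memo)
    | none =>
      if a.getD i ' ' = b.getD j ' ' then
        let r := pvRec a b i j memo
        (r.1, r.2.insert (((i + 1 : Nat) : Int), ((j + 1 : Nat) : Int)) r.1)
      else
        let r1 := pvRec a b i (j + 1) memo
        let r2 := pvRec a b (i + 1) j r1.2
        let r3 := pvRec a b i j r2.2
        let v := 1 + min r1.1 (min r2.1 r3.1)
        (v, r3.2.insert (((i + 1 : Nat) : Int), ((j + 1 : Nat) : Int)) v)
termination_by (i, j)

def edistance_substring_alt (A : String) (B : String) : Int :=
  (pvRec A.toList B.toList A.toList.length B.toList.length PySem.Dict.empty).1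

-- ===== PRECONDITION & SPEC =====
def Spec_edistance_substring (A : String) (B : String) (out : Int) : Prop := out = edistance_substring_alt A B
instance (A : String) (B : String) (out : Int) : Decidable (Spec_edistance_substring A B out) := by unfold Spec_edistance_substring; infer_instance

-- ===== CLAIM (what is proved, stated in full; the proofs are below) =====
def Claim_equal_edistance_substring : Prop := ∀ (A : String) (B : String), Dom_edistance_substring A B → Spec_edistance_substring A B (edistance_substring A B)

-- ===== LEMMAS AND PROOFS =====

-- the recurrence both programs compute
def pvE (a b : List Char) : Nat → Nat → Int
  | 0, j => (j : Int)
  | _ + 1, 0 => 0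
  | i + 1, j + 1 =>
    if a.getD i ' ' = b.getD j ' ' then pvE a b i j
    else 1 + min (pvE a b i (j + 1)) (min (pvE a b (i + 1) j) (pvE a b i j))
termination_by i j => (i, j)

theorem pvGD_pvSD_same (D : List (List Int)) (i j : Nat) (v : Int)
    (hi : i < D.length) (hj : j < (D.getD i []).length) :
    pvGD (pvSD D i j v) i j = v := by
  unfold pvGD pvSD
  simp only [List.getD_eq_getElem?_getD] at hj ⊢
  rw [List.getElem?_set_self (by simpa using hi)]
  simp only [Option.getD_some]
  rw [List.getElem?_set_self hj]
  rfl

theorem pvGD_pvSD_ne (D : List (List Int)) (i j : Nat) (v : Int) (p q : Nat)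
    (h : p ≠ i ∨ q ≠ j) :
    pvGD (pvSD D i j v) p q = pvGD D p q := by
  unfold pvGD pvSD
  by_cases hpi : p = i
  · subst hpi
    have hq : q ≠ j := h.resolve_left (by simp)
    by_cases hl : p < D.length
    · simp only [List.getD_eq_getElem?_getD]
      rw [List.getElem?_set_self (by simpa using hl)]
      simp only [Option.getD_some]
      rw [List.getElem?_set_ne (Ne.symm hq)]
    · rw [List.set_eq_of_length_le (by simpa using Nat.le_of_not_lt hl)]
  · simp only [List.getD_eq_getElem?_getD]
    rw [List.getElem?_set_ne (Ne.symm hpi)]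

theorem pvSD_length (D : List (List Int)) (i j : Nat) (v : Int) :
    (pvSD D i j v).length = D.length := by
  simp [pvSD]

theorem rowlen (D : List (List Int)) (i L : Nat) (hD : ∀ r ∈ D, r.length = L)
    (hi : i < D.length) : (D.getD i []).length = L := by
  rw [List.getD_eq_getElem?_getD, List.getElem?_eq_getElem hi]
  exact hD _ (List.getElem_mem hi)

theorem pvSD_rows (D : List (List Int)) (i j : Nat) (v : Int) (L : Nat)
    (hD : ∀ r ∈ D, r.length = L) (hi : i < D.length) :
    ∀ r ∈ pvSD D i j v, r.length = L := by
  intro r hr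
  rcases List.mem_or_eq_of_mem_set hr with h | h
  · exact hD r h
  · subst h
    rw [List.length_set]
    exact rowlen D i L hD hi

-- ----- A side -----

-- inner loop of A: filling row i left to right
theorem A_inner (a b : List Char) (n m i : Nat) (hi : i ≤ n) :
    ∀ (t : Nat), t ≤ m + 1 → ∀ (D : List (List Int)),
    D.length = n + 1 → (∀ r ∈ D, r.length = m + 1) →
    (∀ p q, p < i → q ≤ m → pvGD D p q = pvE a b p q) →
    ∀ (D' : List (List Int)),
    (List.range t).foldl (fun D j =>
        pvSD D i j
          (if i = 0 then (j : Int)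
           else if j = 0 then 0
           else if a.getD (i - 1) ' ' = b.getD (j - 1) ' ' then pvGD D (i - 1) (j - 1)
           else 1 + min (pvGD D (i - 1) j) (min (pvGD D i (j - 1)) (pvGD D (i - 1) (j - 1))))) D = D' →
    D'.length = n + 1 ∧ (∀ r ∈ D', r.length = m + 1) ∧
    (∀ p q, p < i → q ≤ m → pvGD D' p q = pvE a b p q) ∧
    (∀ q, q < t → pvGD D' i q = pvE a b i q) := by
  intro t
  induction t with
  | zero =>
    intro _ D h1 h2 h3 D' hD'
    simp only [List.range_zero, List.foldl_nil] at hD'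
    subst hD'
    exact ⟨h1, h2, h3, fun q hq => absurd hq (by omega)⟩
  | succ t ih =>
    intro ht D h1 h2 h3 D'' hD''
    rw [List.range_succ, List.foldl_append, List.foldl_cons, List.foldl_nil] at hD''
    obtain ⟨g1, g2, g3, g4⟩ := ih (by omega) D h1 h2 h3 _ rfl
    set D' := (List.range t).foldl _ D with hDdef
    have hiL : i < D'.length := by omega
    have hrow : (D'.getD i []).length = m + 1 := rowlen _ _ _ g2 hiL
    have hval :
        (if i = 0 then (t : Int)
         else if t = 0 then 0
         else if a.getD (i - 1) ' ' = b.getD (t - 1) ' ' then pvGD D' (i - 1) (t - 1)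
         else 1 + min (pvGD D' (i - 1) t) (min (pvGD D' i (t - 1)) (pvGD D' (i - 1) (t - 1))))
        = pvE a b i t := by
      match i, t, ht with
      | 0, t, _ => simp [pvE]
      | i' + 1, 0, _ => simp [pvE]
      | i' + 1, t' + 1, ht =>
        have e1 : pvGD D' i' t' = pvE a b i' t' := g3 i' t' (by omega) (by omega)
        have e2 : pvGD D' i' (t' + 1) = pvE a b i' (t' + 1) := g3 i' (t' + 1) (by omega) (by omega)
        have e3 : pvGD D' (i' + 1) t' = pvE a b (i' + 1) t' := g4 t' (by omega)
        simp only [Nat.add_sub_cancel, Nat.succ_ne_zero, if_false, e1, e2, e3]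
        rw [pvE]
    subst hD''
    refine ⟨by rw [pvSD_length]; exact g1, pvSD_rows _ _ _ _ _ g2 hiL, ?_, ?_⟩
    · intro p q hp hq
      rw [pvGD_pvSD_ne _ _ _ _ _ _ (Or.inl (by omega))]
      exact g3 p q hp hq
    · intro q hq
      by_cases hqt : q = t
      · subst hqt
        rw [pvGD_pvSD_same _ _ _ _ hiL (by omega), hval]
      · rw [pvGD_pvSD_ne _ _ _ _ _ _ (Or.inr hqt)]
        exact g4 q (by omega)

-- outer loop of A: rows 0..s-1 hold the recurrence values
theorem A_outer (a b : List Char) (n m : Nat) :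
    ∀ (s : Nat), s ≤ n + 1 → ∀ (D' : List (List Int)),
    (List.range s).foldl (fun D i =>
        (List.range (m + 1)).foldl (fun D j =>
          pvSD D i j
            (if i = 0 then (j : Int)
             else if j = 0 then 0
             else if a.getD (i - 1) ' ' = b.getD (j - 1) ' ' then pvGD D (i - 1) (j - 1)
             else 1 + min (pvGD D (i - 1) j) (min (pvGD D i (j - 1)) (pvGD D (i - 1) (j - 1))))) D)
        (List.replicate (n + 1) (List.replicate (m + 1) (0 : Int))) = D' →
    D'.length = n + 1 ∧ (∀ r ∈ D', r.length = m + 1) ∧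
    (∀ p q, p < s → q ≤ m → pvGD D' p q = pvE a b p q) := by
  intro s
  induction s with
  | zero =>
    intro _ D' hD'
    simp only [List.range_zero, List.foldl_nil] at hD'
    subst hD'
    refine ⟨by simp, ?_, fun p q hp _ => absurd hp (by omega)⟩
    intro r hr
    rw [List.eq_of_mem_replicate hr]; simp
  | succ s ih =>
    intro hs D'' hD''
    rw [List.range_succ (n := s), List.foldl_append, List.foldl_cons, List.foldl_nil] at hD''
    obtain ⟨g1, g2, g3⟩ := ih (by omega) _ rfl
    obtain ⟨k1, k2, k3, k4⟩ := A_inner a b n m s (by omega) (m + 1) (le_refl _) _ g1 g2 g3 D'' hD''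
    refine ⟨k1, k2, ?_⟩
    intro p q hp hq
    by_cases hps : p = s
    · subst hps; exact k4 q (by omega)
    · exact k3 p q (by omega) hq

-- ----- B side -----

-- the memo invariant: every stored entry is the recurrence value of its key
def pvGood (a b : List Char) (memo : PySem.Dict (Int × Int) Int) : Prop :=
  ∀ (p q : Nat) (v : Int), memo.get? ((p : Int), (q : Int)) = some v → v = pvE a b p q

theorem pvGood_empty (a b : List Char) : pvGood a b PySem.Dict.empty := by
  intro p q v h
  simp [PySem.Dict.get?_empty] at h

theorem pvGood_insert (a b : List Char) (memo : PySem.Dict (Int × Int) Int)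
    (i j : Nat) (v : Int) (hm : pvGood a b memo) (hv : v = pvE a b i j) :
    pvGood a b (memo.insert ((i : Int), (j : Int)) v) := by
  intro p q w h
  rw [PySem.Dict.get?_insert] at h
  split at h
  · rename_i heq
    obtain ⟨hp, hq⟩ := Prod.mk.injEq .. ▸ heq
    have hp' : p = i := by exact_mod_cast hp
    have hq' : q = j := by exact_mod_cast hq
    subst hp'; subst hq'
    cases h
    exact hv
  · exact hm p q w h

-- the memoized recursion returns the recurrence value and preserves the invariant
theorem pvRec_correct (a b : List Char) :
    ∀ (N : Nat), ∀ (i j : Nat), i + j ≤ N → ∀ memo, pvGood a b memo →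
    (pvRec a b i j memo).1 = pvE a b i j ∧ pvGood a b (pvRec a b i j memo).2 := by
  intro N
  induction N with
  | zero =>
    intro i j hij memo hm
    have : i = 0 := by omega
    subst this
    rw [pvRec]
    exact ⟨by simp [pvE], hm⟩
  | succ N ih =>
    intro i j hij memo hm
    match i, j with
    | 0, j => rw [pvRec]; exact ⟨by simp [pvE], hm⟩
    | i + 1, 0 => rw [pvRec]; exact ⟨by simp [pvE], hm⟩
    | i + 1, j + 1 =>
      rw [pvRec]
      cases hget : memo.get? (((i + 1 : Nat) : Int), ((j + 1 : Nat) : Int)) with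
      | some v =>
        simp only
        exact ⟨hm (i + 1) (j + 1) v hget, hm⟩
      | none =>
        simp only
        by_cases hc : a.getD i ' ' = b.getD j ' '
        · rw [if_pos hc]
          obtain ⟨e1, g1⟩ := ih i j (by omega) memo hm
          constructor
          · rw [e1, pvE, if_pos hc]
          · exact pvGood_insert a b _ (i + 1) (j + 1) _ g1 (by rw [e1, pvE, if_pos hc])
        · rw [if_neg hc]
          obtain ⟨e1, g1⟩ := ih i (j + 1) (by omega) memo hm
          obtain ⟨e2, g2⟩ := ih (i + 1) j (by omega) _ g1
          obtain ⟨e3, g3⟩ := ih i j (by omega) _ g2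
          have hv : 1 + min (pvRec a b i (j + 1) memo).1
              (min (pvRec a b (i + 1) j (pvRec a b i (j + 1) memo).2).1
                (pvRec a b i j (pvRec a b (i + 1) j (pvRec a b i (j + 1) memo).2).2).1)
              = pvE a b (i + 1) (j + 1) := by
            rw [e1, e2, e3, pvE, if_neg hc]
          exact ⟨hv, pvGood_insert a b _ (i + 1) (j + 1) _ g3 hv⟩

-- ===== VERDICT (by name: the statement is the Claim_ definition above) =====
theorem edistance_substring_spec : Claim_equal_edistance_substring := by
  intro A B _
  unfold Spec_edistance_substring edistance_substring edistance_substring_alt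
  obtain ⟨_, _, hA⟩ := A_outer A.toList B.toList A.toList.length B.toList.length
    (A.toList.length + 1) (le_refl _) _ rfl
  rw [hA A.toList.length B.toList.length (by omega) (le_refl _)]
  exact ((pvRec_correct A.toList B.toList (A.toList.length + B.toList.length)
    A.toList.length B.toList.length (le_refl _) PySem.Dict.empty
    (pvGood_empty A.toList B.toList)).1).symm
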